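-- pv_equiv track=rewrite | github.com/oewilliams/sucess_in_showbusiness | AM_misclassification/misclass_analyser_full_fail.py | analyse_data
-- ===== SOURCE A (Python) =====
-- def get_AM(X):
--
-- 	#AM_val = X.index(max(X))
--
-- 	rev = X[::-1]		#Reverse list.
-- 	AM_rev = rev.index(max(X))			#Get the location of the last AM (first in reversed sequence).
-- 	AM_val = len(X) - AM_rev - 1			#Index of last AM in foward sequence.
--
-- 	return AM_val
--
-- def analyse_data(data):
--
-- 	dist_list = []
--
-- 	for x in data:
-- 		pre_series = x[0]
-- 		post_series = x[1]
--
-- 		false_AM_index = get_AM(pre_series)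
-- 		true_AM_index = get_AM(pre_series+post_series)
--
-- 		dist_list.append(true_AM_index-false_AM_index)
--
-- 	return dist_list
-- ===== SOURCE B (Python) =====
-- def _last_argmax(X):
--     best_i = 0
--     best = X[0]
--     for i, v in enumerate(X[1:], 1):
--         if v >= best:
--             best = v
--             best_i = i
--     return best_i
--
-- def analyse_data(data):
--     return [_last_argmax(pre + post) - _last_argmax(pre) for pre, post in data]
-- ===== Notes on version B (the rewrite author's own statement) =====
-- stated objective: simpler
-- what changed: get_AM's reversed-copy + .index + length arithmetic is replaced by one forward pass tracking the running maximum and its last index (>= so ties keep the last occurrence), and the loop-with-append becomes a list comprehension.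
-- outside the precondition, e.g. on analyse_data([([], [1])]): A raises ValueError, B raises IndexError
import Mathlib
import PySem

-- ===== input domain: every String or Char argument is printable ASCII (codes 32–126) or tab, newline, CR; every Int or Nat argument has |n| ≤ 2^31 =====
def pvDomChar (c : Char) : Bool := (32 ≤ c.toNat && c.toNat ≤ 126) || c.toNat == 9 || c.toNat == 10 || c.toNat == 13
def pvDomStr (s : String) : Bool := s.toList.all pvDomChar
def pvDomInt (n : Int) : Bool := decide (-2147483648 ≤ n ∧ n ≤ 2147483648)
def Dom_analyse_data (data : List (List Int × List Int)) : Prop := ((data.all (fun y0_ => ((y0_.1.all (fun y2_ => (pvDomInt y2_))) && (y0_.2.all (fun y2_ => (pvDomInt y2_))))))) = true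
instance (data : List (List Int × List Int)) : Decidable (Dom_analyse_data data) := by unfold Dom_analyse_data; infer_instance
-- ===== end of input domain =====

-- B replaces the reversed-copy + .index + length arithmetic of get_AM by a single
-- forward pass tracking the running maximum and its last index (objective: simpler).

-- ===== PORT A =====
-- get_AM: rev = X[::-1]; AM_rev = rev.index(max(X)); return len(X) - AM_rev - 1.
-- Returns none where Python raises (ValueError of max/.index on empty X).
def get_AM (X : List Int) : Option Int :=
  match PySem.List.slice? X none none (-1) with
  | none => none
  | some rev =>
    match PySem.List.max? X (fun y => y) with
    | none => none
    | some m =>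
      match PySem.List.index? rev m with
      | none => none
      | some AM_rev => some ((X.length : Int) - (AM_rev : Int) - 1)

def analyse_data (data : List (List Int × List Int)) : List Int :=
  data.foldl (fun dist_list x =>
    let pre_series := x.1
    let post_series := x.2
    let false_AM := get_AM pre_series
    let true_AM := get_AM (pre_series ++ post_series)
    -- .getD 0 is unreachable under Pre_: Python raises ValueError there
    dist_list ++ [true_AM.getD 0 - false_AM.getD 0]) []

-- ===== PORT B =====
-- forward pass: state (best_i, best, i); ties (v >= best) keep the last index.
-- [] case is unreachable under Pre_ (Python B raises IndexError on X[0]).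
def last_argmax (X : List Int) : Int :=
  match X with
  | [] => 0
  | v0 :: rest =>
    (rest.foldl (fun (s : Int × Int × Int) v =>
        if v ≥ s.2.1 then (s.2.2, v, s.2.2 + 1) else (s.1, s.2.1, s.2.2 + 1))
      ((0 : Int), v0, (1 : Int))).1

def analyse_data_alt (data : List (List Int × List Int)) : List Int :=
  data.map (fun p => last_argmax (p.1 ++ p.2) - last_argmax p.1)

-- ===== PRECONDITION & SPEC =====
-- Pre_ excludes pairs with empty pre_series: there Python A raises ValueError
-- (max of empty sequence) and Python B raises IndexError.
def Pre_analyse_data (data : List (List Int × List Int)) : Prop :=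
  ∀ p ∈ data, p.1 ≠ []
instance (data : List (List Int × List Int)) : Decidable (Pre_analyse_data data) := by unfold Pre_analyse_data; infer_instance

def pvWitness_analyse_data : (List (List Int × List Int)) := [([1, 3, 3], [2, 5]), ([0], [])]

def Spec_analyse_data (data : List (List Int × List Int)) (out : List Int) : Prop := out = analyse_data_alt data
instance (data : List (List Int × List Int)) (out : List Int) : Decidable (Spec_analyse_data data out) := by unfold Spec_analyse_data; infer_instance

-- ===== CLAIM (what is proved, stated in full; the proofs are below) =====
def Claim_equal_analyse_data : Prop := ∀ (data : List (List Int × List Int)), Dom_analyse_data data → Pre_analyse_data data → Spec_analyse_data data (analyse_data data)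

-- ===== LEMMAS AND PROOFS =====

-- B's fold step, named for the proofs
def bStep (s : Int × Int × Int) (v : Int) : Int × Int × Int :=
  if v ≥ s.2.1 then (s.2.2, v, s.2.2 + 1) else (s.1, s.2.1, s.2.2 + 1)

lemma last_argmax_cons (v0 : Int) (rest : List Int) :
    last_argmax (v0 :: rest) = (rest.foldl bStep ((0 : Int), v0, (1 : Int))).1 := by
  rfl

-- Invariant of B's fold, tied to A's reversed .index search.
lemma bFold_inv (v0 : Int) (rest : List Int) :
    ∃ k : Nat,
      (rest.foldl bStep ((0 : Int), v0, (1 : Int))).1 = (k : Int) ∧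
      (rest.foldl bStep ((0 : Int), v0, (1 : Int))).2.1 = rest.foldl max v0 ∧
      (rest.foldl bStep ((0 : Int), v0, (1 : Int))).2.2 = (rest.length : Int) + 1 ∧
      k ≤ rest.length ∧
      PySem.List.index? (v0 :: rest).reverse (rest.foldl max v0) = some (rest.length - k) := by
  induction rest using List.reverseRecOn with
  | nil =>
    refine ⟨0, by simp [PySem.List.index?]⟩
  | append_singleton r v ih =>
    obtain ⟨k, h1, h2, h3, h4, h5⟩ := ih
    rw [List.foldl_append, List.foldl_append]
    simp only [List.foldl_cons, List.foldl_nil]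
    have hrev : (v0 :: (r ++ [v])).reverse = v :: (v0 :: r).reverse := by simp
    by_cases hv : (r.foldl max v0) ≤ v
    · -- v >= running max: new last argmax is this position
      have hmax : max (r.foldl max v0) v = v := max_eq_right hv
      refine ⟨r.length + 1, ?_, ?_, ?_, ?_, ?_⟩
      · simp [bStep, h2, hv, h3]
      · simp [bStep, h2, hv]
      · simp [bStep, h2, hv, h3]
      · simp
      · rw [hmax, hrev, PySem.List.index?_cons_self]
        simp only [List.length_append, List.length_cons, List.length_nil]
        congr 1
        omega
    · -- v < running max: state keeps old argmax
      have hmax : max (r.foldl max v0) v = r.foldl max v0 := max_eq_left (le_of_lt (not_le.mp hv))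
      refine ⟨k, ?_, ?_, ?_, by simp; omega, ?_⟩
      · simp [bStep, h2, hv, h1]
      · simp [bStep, h2, hv]
        omega
      · simp [bStep, h2, hv, h3]
      · have hne : v ≠ r.foldl max v0 := by omega
        rw [hmax, hrev, PySem.List.index?_cons_of_ne _ hne, h5]
        simp only [Option.map_some, List.length_append, List.length_cons, List.length_nil]
        congr 1
        omega

-- Core equivalence of the two argmax computations on nonempty lists.
lemma get_AM_eq (X : List Int) (hX : X ≠ []) :
    get_AM X = some (last_argmax X) := by
  obtain ⟨v0, rest, rfl⟩ := List.exists_cons_of_ne_nil hX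
  obtain ⟨k, h1, _, _, h4, h5⟩ := bFold_inv v0 rest
  simp only [get_AM, PySem.List.slice?_none_none_neg_one, PySem.List.max?_id_cons, h5]
  rw [last_argmax_cons, h1]
  congr 1
  simp only [List.length_cons]
  omega

-- foldl-with-append is map
lemma foldl_append_map (g : (List Int × List Int) → Int)
    (data : List (List Int × List Int)) (acc : List Int) :
    data.foldl (fun a x => a ++ [g x]) acc = acc ++ data.map g := by
  induction data generalizing acc with
  | nil => simp
  | cons x t ih => simp [ih]

-- ===== VERDICT (by name: the statement is the Claim_ definition above) =====
theorem analyse_data_spec : Claim_equal_analyse_data := by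
  intro data _ hpre
  unfold Spec_analyse_data analyse_data analyse_data_alt
  rw [foldl_append_map (fun x => (get_AM (x.1 ++ x.2)).getD 0 - (get_AM x.1).getD 0) data []]
  simp only [List.nil_append]
  apply List.map_congr_left
  intro p hp
  have hpre1 : p.1 ≠ [] := hpre p hp
  have hpre2 : p.1 ++ p.2 ≠ [] := by
    intro h; exact hpre1 (List.append_eq_nil_iff.mp h).1
  rw [get_AM_eq p.1 hpre1, get_AM_eq _ hpre2]
  simp
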